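-- pv_equiv track=rewrite | github.com/ProjectBA14/pm-internship-allocation-engine | backend/app/routes/enhanced_internship_routes.py | _get_salary_range_summary
-- ===== SOURCE A (Python) =====
-- def _get_salary_range_summary(internships):
--     """Get salary range summary"""
--     if not internships:
--         return {}
--
--     salaries = []
--     for internship in internships:
--         if internship.get('salary_max'):
--             salaries.append(internship['salary_max'])
--
--     if not salaries:
--         return {}
--
--     return {
--         'min': min(salaries),
--         'max': max(salaries),
--         'avg': sum(salaries) // len(salaries)
--     }
-- ===== SOURCE B (Python) =====
-- def _get_salary_range_summary(internships):
--     """Get salary range summary (single pass, no intermediate list)."""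
--     state = None  # (mn, mx, total, count)
--     for internship in internships:
--         v = internship.get('salary_max')
--         if v:
--             if state is None:
--                 state = (v, v, v, 1)
--             else:
--                 mn, mx, total, count = state
--                 state = (min(mn, v), max(mx, v), total + v, count + 1)
--     if state is None:
--         return {}
--     mn, mx, total, count = state
--     return {'min': mn, 'max': mx, 'avg': total // count}
-- ===== Notes on version B (the rewrite author's own statement) =====
-- stated objective: alternative
-- what changed: Replaced the build-a-list-then-min/max/sum/len pipeline with one fused fold that carries an optional (min, max, total, count) accumulator and never materialises the salaries list.
import Mathlib
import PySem

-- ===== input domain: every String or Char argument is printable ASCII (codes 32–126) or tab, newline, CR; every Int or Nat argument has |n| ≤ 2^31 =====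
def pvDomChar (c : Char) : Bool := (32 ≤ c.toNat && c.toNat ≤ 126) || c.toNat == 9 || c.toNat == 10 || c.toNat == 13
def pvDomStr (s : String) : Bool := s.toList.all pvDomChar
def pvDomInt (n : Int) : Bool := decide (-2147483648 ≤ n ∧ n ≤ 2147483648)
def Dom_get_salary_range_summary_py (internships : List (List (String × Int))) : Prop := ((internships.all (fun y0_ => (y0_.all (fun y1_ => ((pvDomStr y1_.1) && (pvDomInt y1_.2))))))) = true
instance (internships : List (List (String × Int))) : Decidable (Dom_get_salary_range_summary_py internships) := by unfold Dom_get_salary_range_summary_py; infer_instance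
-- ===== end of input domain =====

-- B replaces A's intermediate salaries list + min/max/sum/len calls by one fused fold
-- carrying an optional (min, max, total, count) accumulator; same return value everywhere.

-- ===== PORT A =====
-- internship.get('salary_max'): first match in the association list
def pvGetSalA (i : List (String × Int)) : Option Int :=
  (i.find? (fun p => p.1 == "salary_max")).map (·.2)

def get_salary_range_summary_py (internships : List (List (String × Int))) : List (String × Int) :=
  if internships = [] then []
  else
    let salaries := internships.foldl (fun acc internship =>
      match pvGetSalA internship with
      | some v => if v ≠ 0 then acc ++ [v] else acc   -- truthy int ⇔ nonzero
      | none => acc) []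
    match salaries with
    | [] => []
    | s :: t =>
      [("min", t.foldl min s), ("max", t.foldl max s),
       ("avg", PySem.Int.floordiv (s :: t).sum (s :: t).length)]

-- ===== PORT B =====
def pvStepB (st : Option (Int × Int × Int × Int)) (internship : List (String × Int)) :
    Option (Int × Int × Int × Int) :=
  match (internship.find? (fun p => p.1 == "salary_max")).map (·.2) with
  | some v =>
    if v ≠ 0 then
      match st with
      | none => some (v, v, v, 1)
      | some (mn, mx, total, count) => some (min mn v, max mx v, total + v, count + 1)
    else st
  | none => st

def get_salary_range_summary_py_alt (internships : List (List (String × Int))) : List (String × Int) :=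
  match internships.foldl pvStepB none with
  | none => []
  | some (mn, mx, total, count) =>
    [("min", mn), ("max", mx), ("avg", PySem.Int.floordiv total count)]

-- ===== PRECONDITION & SPEC =====
def Spec_get_salary_range_summary_py (internships : List (List (String × Int))) (out : List (String × Int)) : Prop := out = get_salary_range_summary_py_alt internships
instance (internships : List (List (String × Int))) (out : List (String × Int)) : Decidable (Spec_get_salary_range_summary_py internships out) := by unfold Spec_get_salary_range_summary_py; infer_instance

-- ===== CLAIM (what is proved, stated in full; the proofs are below) =====
def Claim_equal_get_salary_range_summary_py : Prop := ∀ (internships : List (List (String × Int))), Dom_get_salary_range_summary_py internships → Spec_get_salary_range_summary_py internships (get_salary_range_summary_py internships)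

-- ===== LEMMAS AND PROOFS =====

-- B's state corresponding to A's accumulated salaries list
def pvStateOf : List Int → Option (Int × Int × Int × Int)
  | [] => none
  | s :: t => some (t.foldl min s, t.foldl max s, (s :: t).sum, (s :: t).length)

lemma pvStateOf_snoc (acc : List Int) (v : Int) :
    pvStateOf (acc ++ [v]) =
      (match pvStateOf acc with
       | none => some (v, v, v, 1)
       | some (mn, mx, total, count) => some (min mn v, max mx v, total + v, count + 1)) := by
  cases acc with
  | nil => simp [pvStateOf]
  | cons s t =>
    simp [pvStateOf, List.foldl_append]
    omega

lemma pv_fold_agree (l : List (List (String × Int))) (acc : List Int) :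
    l.foldl pvStepB (pvStateOf acc) =
      pvStateOf (l.foldl (fun acc internship =>
        match pvGetSalA internship with
        | some v => if v ≠ 0 then acc ++ [v] else acc
        | none => acc) acc) := by
  induction l generalizing acc with
  | nil => rfl
  | cons i rest ih =>
    simp only [List.foldl_cons]
    have hstep : pvStepB (pvStateOf acc) i =
        pvStateOf (match pvGetSalA i with
          | some v => if v ≠ 0 then acc ++ [v] else acc
          | none => acc) := by
      unfold pvStepB pvGetSalA
      cases h : (i.find? (fun p => p.1 == "salary_max")).map (·.2) with
      | none => simp
      | some v =>
        by_cases hv : v ≠ 0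
        · simp [hv, pvStateOf_snoc]
          cases pvStateOf acc <;> rfl
        · simp [hv]
    rw [hstep, ih]

-- ===== VERDICT (by name: the statement is the Claim_ definition above) =====
theorem get_salary_range_summary_py_spec : Claim_equal_get_salary_range_summary_py := by
  intro internships _
  unfold Spec_get_salary_range_summary_py get_salary_range_summary_py get_salary_range_summary_py_alt
  have h := pv_fold_agree internships []
  simp only [pvStateOf] at h
  rw [h]
  by_cases hnil : internships = []
  · subst hnil; rfl
  · simp only [hnil, ite_false]
    cases hs : internships.foldl (fun acc internship =>
        match pvGetSalA internship with
        | some v => if v ≠ 0 then acc ++ [v] else acc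
        | none => acc) [] with
    | nil => simp
    | cons s t => simp
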